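-- pv_equiv track=rewrite | github.com/jaykim-github/StudyingAlgorithm | python/weirdstringmake.py | solution
-- ===== SOURCE A (Python) =====
-- def solution(s):
--     answer = ''
--     str1 = s.split(' ')
--
--     for i in str1 :
--         cnt = 0
--         for j in i :
--             if cnt % 2 != 0 :
--                 j = j.lower()
--                 cnt = cnt + 1
--             else :
--                 j = j.upper()
--                 cnt = cnt + 1
--             answer += j
--         answer += ' '
--     return answer[:-1]
-- ===== SOURCE B (Python) =====
-- def solution(s):
--     out = []
--     cnt = 0
--     for ch in s:
--         if ch == ' ':
--             out.append(' ')
--             cnt = 0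
--         else:
--             out.append(ch.upper() if cnt % 2 == 0 else ch.lower())
--             cnt += 1
--     return ''.join(out)
-- ===== Notes on version B (the rewrite author's own statement) =====
-- stated objective: simpler
-- what changed: Replaced the split-into-words step, the nested per-word loop and the trailing-character strip by a single flat pass over the characters with one counter that resets on each space, so no word list and no trailing-space fixup are needed.
import Mathlib
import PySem

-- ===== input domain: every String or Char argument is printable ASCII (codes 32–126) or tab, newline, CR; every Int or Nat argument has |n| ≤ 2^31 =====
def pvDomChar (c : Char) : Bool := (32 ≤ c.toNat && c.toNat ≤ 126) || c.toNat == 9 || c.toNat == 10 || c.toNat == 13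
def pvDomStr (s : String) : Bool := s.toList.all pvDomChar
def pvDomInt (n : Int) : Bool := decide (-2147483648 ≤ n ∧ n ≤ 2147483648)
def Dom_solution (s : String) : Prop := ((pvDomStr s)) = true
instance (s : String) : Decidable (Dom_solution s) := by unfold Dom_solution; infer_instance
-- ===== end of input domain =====

-- B replaces the split-into-words plus nested per-word loop by a single flat pass
-- over the characters with a counter that resets on spaces (objective: simpler).

-- ===== PORT A =====
-- literal port of A: split on ' ', nested loops with per-word counter, trailing [:-1]
def solution (s : String) : String :=
  let str1 := PySem.Chars.splitOn s.toList [' ']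
  let answer := str1.foldl (fun answer i =>
    (i.foldl (fun (p : List Char × Nat) j =>
        if p.2 % 2 != 0 then (p.1 ++ [PySem.Chars.lowerChar j], p.2 + 1)
        else (p.1 ++ [PySem.Chars.upperChar j], p.2 + 1)) (answer, 0)).1 ++ [' ']) []
  String.ofList (PySem.Chars.slice answer none (some (-1)))

-- ===== PORT B =====
-- literal port of B: one pass, counter resets on ' '
def solution_alt (s : String) : String :=
  String.ofList ((s.toList.foldl (fun (p : List Char × Nat) ch =>
      if ch = ' ' then (p.1 ++ [' '], 0)
      else (p.1 ++ [if p.2 % 2 == 0 then PySem.Chars.upperChar ch else PySem.Chars.lowerChar ch], p.2 + 1))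
    ([], 0)).1)

-- ===== PRECONDITION & SPEC =====
def Spec_solution (s : String) (out : String) : Prop := out = solution_alt s
instance (s : String) (out : String) : Decidable (Spec_solution s out) := by unfold Spec_solution; infer_instance

-- ===== CLAIM (what is proved, stated in full; the proofs are below) =====
def Claim_equal_solution : Prop := ∀ (s : String), Dom_solution s → Spec_solution s (solution s)

-- ===== LEMMAS AND PROOFS =====

-- cased character as A/B both compute it, at alternation position k
def caseAt (k : Nat) (c : Char) : Char :=
  if k % 2 == 0 then PySem.Chars.upperChar c else PySem.Chars.lowerChar c

-- word alternation starting at counter k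
def gAux (k : Nat) : List Char → List Char
  | [] => []
  | c :: w => caseAt k c :: gAux (k + 1) w

-- simple recursive splitter on ' '
def mySplit : List Char → List (List Char)
  | [] => [[]]
  | c :: cs =>
    if c = ' ' then [] :: mySplit cs
    else match mySplit cs with
      | [] => [[c]]
      | w :: ws => (c :: w) :: ws

def consFirst (p : List Char) : List (List Char) → List (List Char)
  | [] => [p]
  | w :: ws => (p ++ w) :: ws

-- joined result, first word at counter k
def iJoin (k : Nat) : List (List Char) → List Char
  | [] => []
  | [w] => gAux k w
  | w :: ws => gAux k w ++ ' ' :: iJoin 0 ws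

lemma mySplit_ne_nil (cs : List Char) : mySplit cs ≠ [] := by
  cases cs with
  | nil => simp [mySplit]
  | cons c cs =>
    simp only [mySplit]
    split
    · simp
    · cases h : mySplit cs <;> simp

lemma consFirst_append (p q : List Char) (ws : List (List Char)) :
    consFirst (p ++ q) ws = consFirst p (consFirst q ws) := by
  cases ws <;> simp [consFirst]

lemma go_spec (l : List Char) : ∀ (fuel : Nat), l.length ≤ fuel →
    ∀ (cur : List Char) (acc : List (List Char)),
    PySem.Chars.splitOn.go [' '] fuel l cur acc = acc.reverse ++ consFirst cur.reverse (mySplit l) := by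
  induction l with
  | nil =>
    intro fuel _ cur acc
    cases fuel <;> simp [PySem.Chars.splitOn.go, mySplit, consFirst]
  | cons c rest ih =>
    intro fuel hf cur acc
    cases fuel with
    | zero => simp at hf
    | succ f =>
      have hr : rest.length ≤ f := by simpa using hf
      by_cases hc : c = ' '
      · subst hc
        have hpre : List.isPrefixOf [' '] (' ' :: rest) = true := by simp [List.isPrefixOf]
        simp only [PySem.Chars.splitOn.go, hpre, if_pos, List.length_cons, List.length_nil,
          List.drop_succ_cons, List.drop_zero]
        rw [ih f hr [] (cur.reverse :: acc)]
        cases h : mySplit rest with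
        | nil => exact absurd h (mySplit_ne_nil rest)
        | cons w ws => simp [mySplit, consFirst, h]
      · have hpre : List.isPrefixOf [' '] (c :: rest) = false := by
          simp [List.isPrefixOf]; exact fun h => hc h.symm
        simp only [PySem.Chars.splitOn.go, hpre, Bool.false_eq_true, if_false]
        rw [ih f hr (c :: cur) acc]
        have : mySplit (c :: rest) = consFirst [c] (mySplit rest) := by
          simp only [mySplit, if_neg hc]
          cases h : mySplit rest with
          | nil => exact absurd h (mySplit_ne_nil rest)
          | cons w ws => simp [consFirst]
        rw [this, List.reverse_cons, consFirst_append]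

lemma splitOn_eq_mySplit (cs : List Char) :
    PySem.Chars.splitOn cs [' '] = mySplit cs := by
  have h := go_spec cs (cs.length + 1) (by omega) [] []
  simp only [PySem.Chars.splitOn, h, List.reverse_nil, List.nil_append]
  cases hm : mySplit cs with
  | nil => exact absurd hm (mySplit_ne_nil cs)
  | cons w ws => simp [consFirst]

-- A's inner fold computes gAux
lemma inner_fold_spec (w : List Char) : ∀ (acc : List Char) (k : Nat),
    (w.foldl (fun (p : List Char × Nat) j =>
        if p.2 % 2 != 0 then (p.1 ++ [PySem.Chars.lowerChar j], p.2 + 1)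
        else (p.1 ++ [PySem.Chars.upperChar j], p.2 + 1)) (acc, k)).1 = acc ++ gAux k w := by
  induction w with
  | nil => intro acc k; simp [gAux]
  | cons c w ih =>
    intro acc k
    simp only [List.foldl_cons]
    by_cases hk : k % 2 = 0
    · simp only [hk, bne_self_eq_false, ih, gAux, caseAt, beq_self_eq_true, if_pos]
      simp
    · have hk1 : k % 2 = 1 := by omega
      have h1 : (k % 2 != 0) = true := by simp [hk1]
      have h2 : (k % 2 == 0) = false := by simp [hk1]
      simp only [h1, if_true, ih, gAux, caseAt, h2, Bool.false_eq_true, if_false]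
      simp

-- A's outer fold produces concatenated (gAux 0 w ++ [' ']) blocks
lemma outer_fold_spec (parts : List (List Char)) : ∀ (acc : List Char),
    parts.foldl (fun answer i =>
      (i.foldl (fun (p : List Char × Nat) j =>
          if p.2 % 2 != 0 then (p.1 ++ [PySem.Chars.lowerChar j], p.2 + 1)
          else (p.1 ++ [PySem.Chars.upperChar j], p.2 + 1)) (answer, 0)).1 ++ [' ']) acc
    = acc ++ (parts.map (fun w => gAux 0 w ++ [' '])).flatten := by
  induction parts with
  | nil => intro acc; simp
  | cons w ws ih =>
    intro acc
    simp only [List.foldl_cons, inner_fold_spec, List.map_cons, List.flatten_cons]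
    simp

-- dropping the final ' ' of the concatenation gives the ' '-interleaved join
lemma dropLast_flatten (parts : List (List Char)) (hne : parts ≠ []) :
    ((parts.map (fun w => gAux 0 w ++ [' '])).flatten).dropLast = iJoin 0 parts := by
  induction parts with
  | nil => exact absurd rfl hne
  | cons w ws ih =>
    cases ws with
    | nil => simp [iJoin, List.dropLast_append_of_ne_nil]
    | cons v vs =>
      have h2 := ih (by simp)
      simp only [List.map_cons, List.flatten_cons] at h2
      simp only [List.map_cons, List.flatten_cons]
      rw [List.dropLast_append_of_ne_nil (by simp), h2]
      simp [iJoin]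

-- B's fold with counter k appends gAux-join of the remaining split
lemma b_fold_spec (cs : List Char) : ∀ (acc : List Char) (k : Nat),
    (cs.foldl (fun (p : List Char × Nat) ch =>
      if ch = ' ' then (p.1 ++ [' '], 0)
      else (p.1 ++ [if p.2 % 2 == 0 then PySem.Chars.upperChar ch else PySem.Chars.lowerChar ch], p.2 + 1))
      (acc, k)).1 = acc ++ iJoin k (mySplit cs) := by
  induction cs with
  | nil => intro acc k; simp [mySplit, iJoin, gAux]
  | cons c cs ih =>
    intro acc k
    by_cases hc : c = ' '
    · subst hc
      simp only [List.foldl_cons, ih, mySplit]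
      cases h : mySplit cs with
      | nil => exact absurd h (mySplit_ne_nil cs)
      | cons w ws => simp [iJoin, gAux]
    · simp only [List.foldl_cons, if_neg hc, ih]
      have hsp : mySplit (c :: cs) =
          match mySplit cs with
          | [] => [[c]]
          | w :: ws => (c :: w) :: ws := by simp [mySplit, hc]
      cases h : mySplit cs with
      | nil => exact absurd h (mySplit_ne_nil cs)
      | cons w ws =>
        rw [hsp, h]
        cases ws <;> simp [iJoin, gAux, caseAt]

-- ===== VERDICT (by name: the statement is the Claim_ definition above) =====
theorem solution_spec : Claim_equal_solution := by
  intro s _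
  unfold Spec_solution solution solution_alt
  simp only [splitOn_eq_mySplit, outer_fold_spec, List.nil_append, b_fold_spec]
  congr 1
  rw [PySem.Chars.slice_eq_listSlice, PySem.List.slice_to_neg_one, dropLast_flatten _ (mySplit_ne_nil s.toList)]
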